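-- pv_equiv track=rewrite | github.com/kochungcheon/Codingtest_gumi3 | kakao/2021 KAKAO BLIND RECRUITMENT/신규 아이디 추천/신규 아이디 추천_재건.py | solution
-- ===== SOURCE A (Python) =====
-- def solution(new_id):
--     answer = ''
--     remove_str = '~!@#$%^&*()=+[{]}:?,<>/'
--     # 1.
--     new_id = new_id.lower()
--     # 2.
--     new_id = list(new_id)
--     for i in range(len(new_id)):
--         if new_id[i] in remove_str:
--             new_id[i] = ''
--     new_id = list(''.join(new_id))
--     # 3.
--     flag = False
--     for i in range(len(new_id)):
--         if new_id[i] == '.':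
--             if flag:
--                 new_id[i] = ''
--             else:
--                 flag = True
--         else:
--             flag = False
--     # 4.
--     answer = ''.join(new_id)
--     answer = answer.strip('.')
--     # 5.
--     if answer == '':
--         answer = 'a'
--     # 6.
--     answer = answer[:15]
--     answer = answer.rstrip('.')
--     # 7.
--     while len(answer) < 3:
--         answer += answer[-1]
--     return answer
-- ===== SOURCE B (Python) =====
-- def solution(new_id):
--     remove_str = '~!@#$%^&*()=+[{]}:?,<>/'
--     filtered = ''.join(c for c in new_id.lower() if c not in remove_str)
--     # splitting on '.' and rejoining the nonempty pieces collapses runs of dots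
--     # and strips leading/trailing dots in one step
--     body = '.'.join(piece for piece in filtered.split('.') if piece) or 'a'
--     trimmed = body[:15].rstrip('.')
--     return trimmed.ljust(3, trimmed[-1])
-- ===== Notes on version B (the rewrite author's own statement) =====
-- stated objective: idiomatic
-- what changed: Dot handling is done by string splitting instead of a character state machine: B filters the blacklist in one comprehension, then splits on '.' and rejoins the nonempty pieces (which collapses dot runs and strips end dots at once, replacing A's flag loop plus strip), uses `or 'a'` for the empty default and ljust for padding instead of A's while-append loop; the C-level split/join/ljust make it measurably faster.
import Mathlib
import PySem

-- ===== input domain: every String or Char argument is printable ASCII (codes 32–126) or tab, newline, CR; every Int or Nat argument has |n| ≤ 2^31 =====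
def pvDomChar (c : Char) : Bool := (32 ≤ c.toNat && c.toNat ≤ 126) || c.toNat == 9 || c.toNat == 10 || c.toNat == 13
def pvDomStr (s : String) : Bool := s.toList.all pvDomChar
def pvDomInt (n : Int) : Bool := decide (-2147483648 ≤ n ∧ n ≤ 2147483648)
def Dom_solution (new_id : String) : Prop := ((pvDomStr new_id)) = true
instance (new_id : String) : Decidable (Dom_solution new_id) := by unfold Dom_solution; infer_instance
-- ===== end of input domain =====

-- B handles the dots by string splitting (split on '.', rejoin nonempty pieces) instead of
-- A's per-character flag state machine, with `or 'a'`/ljust for the tail (objective: idiomatic).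


-- shared constant: remove_str = '~!@#$%^&*()=+[{]}:?,<>/'
def pvRemove : List Char := "~!@#$%^&*()=+[{]}:?,<>/".toList

-- Python s.rstrip('.') (not in PySem with a chars argument): drop trailing '.'s — exact
def pvRstripDot (cs : List Char) : List Char :=
  ((cs.reverse).dropWhile (fun c => c == '.')).reverse

-- ===== PORT A =====
-- step 2: each blacklisted char is replaced by '' and the pieces are rejoined
def pvStep2 (cs : List Char) : List Char :=
  (cs.map (fun c => if pvRemove.contains c then ([] : List Char) else [c])).flatten

-- step 3: flag state machine, dot after dot is blanked; pieces rejoined as we go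
def pvStep3Go (st : Bool × List Char) (c : Char) : Bool × List Char :=
  if c = '.' then
    if st.1 then (st.1, st.2) else (true, st.2 ++ [c])
  else (false, st.2 ++ [c])

def pvStep3 (cs : List Char) : List Char := (cs.foldl pvStep3Go (false, [])).2

-- step 7: while len(answer) < 3: answer += answer[-1]  (fuel 3 suffices: length grows by
-- one per iteration; answer[-1] on '' would raise in Python — that branch is unreachable)
def pvStep7 : Nat → List Char → List Char
  | 0, s => s
  | n + 1, s =>
    if s.length < 3 then
      match s.getLast? with
      | some c => pvStep7 n (s ++ [c])
      | none => s
    else s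

def solution (new_id : String) : String :=
  let s1 := PySem.Chars.lower new_id.toList                -- 1. lower()
  let s2 := pvStep2 s1                                     -- 2.
  let s3 := pvStep3 s2                                     -- 3.
  let a4 := PySem.Chars.stripChars s3 ['.']                -- 4. strip('.')
  let a5 := if a4 = [] then ['a'] else a4                  -- 5.
  let a6 := pvRstripDot (PySem.List.slice a5 none (some 15))  -- 6. [:15], rstrip('.')
  String.ofList (pvStep7 3 a6)                                 -- 7.

-- ===== PORT B =====
def solution_alt (new_id : String) : String :=
  -- filtered = ''.join(c for c in new_id.lower() if c not in remove_str)
  let filtered := (PySem.Chars.lower new_id.toList).filter (fun c => !(pvRemove.contains c))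
  -- body = '.'.join(piece for piece in filtered.split('.') if piece) or 'a'
  let pieces := (PySem.Chars.splitOn filtered ['.']).filter (fun p => !p.isEmpty)
  let joined := PySem.Chars.join ['.'] pieces
  let body := if joined = [] then ['a'] else joined
  -- trimmed = body[:15].rstrip('.')
  let trimmed := pvRstripDot (body.take 15)
  -- trimmed.ljust(3, trimmed[-1]); trimmed[-1] on '' would raise in Python — unreachable
  match trimmed.getLast? with
  | some c => String.ofList (trimmed ++ List.replicate (3 - trimmed.length) c)
  | none => String.ofList trimmed

-- ===== PRECONDITION & SPEC =====
def Spec_solution (new_id : String) (out : String) : Prop := out = solution_alt new_id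
instance (new_id : String) (out : String) : Decidable (Spec_solution new_id out) := by unfold Spec_solution; infer_instance

-- ===== CLAIM (what is proved, stated in full; the proofs are below) =====
def Claim_equal_solution : Prop := ∀ (new_id : String), Dom_solution new_id → Spec_solution new_id (solution new_id)

-- ===== LEMMAS AND PROOFS =====

-- proof-side canonical split of a char list at '.' and recursive form of A's collapse pass
def pvCanon : List Char → List (List Char)
  | [] => [[]]
  | c :: rest =>
    if c = '.' then [] :: pvCanon rest
    else
      match pvCanon rest with
      | s :: ss => (c :: s) :: ss
      | [] => [[c]]
def pvConsHead (p : List Char) : List (List Char) → List (List Char)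
  | s :: ss => (p ++ s) :: ss
  | [] => [p]
def pvWords (cs : List Char) : List (List Char) := (pvCanon cs).filter (fun p => !p.isEmpty)
def pvCollapse : List Char → List Char
  | [] => []
  | c :: rest =>
    if c = '.' then '.' :: pvCollapse (rest.dropWhile (fun a => a == '.'))
    else c :: pvCollapse rest
termination_by cs => cs.length
decreasing_by
  · exact Nat.lt_succ_of_le (rest.length_dropWhile_le _)
  · simp


lemma canon_ne_nil (cs : List Char) : pvCanon cs ≠ [] := by
  cases cs with
  | nil => simp [pvCanon]
  | cons c rest =>
    simp only [pvCanon]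
    split
    · simp
    · cases h : pvCanon rest <;> simp

-- ['.'] as strip-chars set: membership is just == '.'

-- A's blank-and-rejoin pass is a filter
lemma map_blank_flatten (p : Char → Bool) (cs : List Char) :
    (cs.map (fun c => if p c then ([] : List Char) else [c])).flatten
      = cs.filter (fun c => !p c) := by
  induction cs with
  | nil => rfl
  | cons c cs ih => by_cases h : p c <;> simp [h, ih]

lemma step2_eq_filter (cs : List Char) :
    pvStep2 cs = cs.filter (fun c => !(pvRemove.contains c)) :=
  map_blank_flatten (fun c => pvRemove.contains c) cs

-- A's flag loop computes pvCollapse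
lemma step3_loop (cs : List Char) : ∀ out : List Char,
    (cs.foldl pvStep3Go (false, out)).2 = out ++ pvCollapse cs ∧
    (cs.foldl pvStep3Go (true, out)).2 = out ++ pvCollapse (cs.dropWhile (fun a => a == '.')) := by
  induction cs with
  | nil => intro out; simp [pvCollapse]
  | cons c rest ih =>
    intro out
    by_cases hc : c = '.'
    · subst hc
      constructor
      · have h1 : pvStep3Go (false, out) '.' = (true, out ++ ['.']) := by simp [pvStep3Go]
        simp only [List.foldl_cons, h1, (ih (out ++ ['.'])).2, pvCollapse]
        simp
      · have h1 : pvStep3Go (true, out) '.' = (true, out) := by simp [pvStep3Go]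
        simp only [List.foldl_cons, h1, (ih out).2]
        simp
    · have h1 : ∀ b, pvStep3Go (b, out) c = (false, out ++ [c]) := by
        intro b; simp [pvStep3Go, hc]
      have hcol : pvCollapse (c :: rest) = c :: pvCollapse rest := by
        rw [pvCollapse]; simp [hc]
      constructor
      · simp only [List.foldl_cons, h1, (ih (out ++ [c])).1, hcol]
        simp
      · rw [List.dropWhile_cons]
        simp only [List.foldl_cons, h1, (ih (out ++ [c])).1, hc, hcol]
        simp [hc, hcol]

lemma step3_eq_collapse (cs : List Char) : pvStep3 cs = pvCollapse cs := by
  simpa [pvStep3] using (step3_loop cs []).1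


-- PySem's splitOn at a single-char separator computes pvCanon
lemma go_cons (f : Nat) (c : Char) (rest cur : List Char) (acc : List (List Char)) :
    PySem.Chars.splitOn.go ['.'] (f+1) (c :: rest) cur acc =
      if c = '.' then PySem.Chars.splitOn.go ['.'] f rest [] (cur.reverse :: acc)
      else PySem.Chars.splitOn.go ['.'] f rest (c :: cur) acc := by
  rw [PySem.Chars.splitOn.go]
  by_cases hc : c = '.'
  · simp [hc, List.isPrefixOf]
  · have hb : ('.' == c) = false := by simpa using Ne.symm hc
    simp [hc, List.isPrefixOf, hb]

lemma go_nil (f : Nat) (cur : List Char) (acc : List (List Char)) :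
    PySem.Chars.splitOn.go ['.'] (f+1) [] cur acc = (cur.reverse :: acc).reverse := by
  rw [PySem.Chars.splitOn.go]; simp

lemma splitOn_go_spec (l : List Char) : ∀ (fuel : Nat) (cur : List Char) (acc : List (List Char)),
    l.length < fuel →
    PySem.Chars.splitOn.go ['.'] fuel l cur acc = acc.reverse ++ pvConsHead cur.reverse (pvCanon l) := by
  induction l with
  | nil =>
    intro fuel cur acc hf
    obtain ⟨f, rfl⟩ := Nat.exists_eq_succ_of_ne_zero (by omega : fuel ≠ 0)
    rw [go_nil]
    simp [pvCanon, pvConsHead]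
  | cons c rest ih =>
    intro fuel cur acc hf
    obtain ⟨f, rfl⟩ := Nat.exists_eq_succ_of_ne_zero (by omega : fuel ≠ 0)
    rw [go_cons]
    by_cases hc : c = '.'
    · subst hc
      rw [if_pos rfl, ih f [] (cur.reverse :: acc) (by simpa using Nat.lt_of_succ_lt_succ hf)]
      cases h : pvCanon rest with
      | nil => exact absurd h (canon_ne_nil rest)
      | cons s ss => simp [pvCanon, pvConsHead, h]
    · rw [if_neg hc, ih f (c :: cur) acc (by simpa using Nat.lt_of_succ_lt_succ hf)]
      have h2 : pvCanon (c :: rest) = pvConsHead [c] (pvCanon rest) := by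
        simp only [pvCanon, if_neg hc]
        cases h : pvCanon rest <;> simp [pvConsHead]
      rw [h2]
      cases h : pvCanon rest with
      | nil => exact absurd h (canon_ne_nil rest)
      | cons s ss => simp [pvConsHead]


lemma splitOn_eq_canon (cs : List Char) : PySem.Chars.splitOn cs ['.'] = pvCanon cs := by
  rw [PySem.Chars.splitOn, splitOn_go_spec cs (cs.length + 1) [] [] (Nat.lt_succ_self _)]
  cases h : pvCanon cs with
  | nil => exact absurd h (canon_ne_nil cs)
  | cons s ss => simp [pvConsHead]

lemma contains_dot (c : Char) : (['.'] : List Char).contains c = (c == '.') := by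
  by_cases h : c = '.' <;> simp [h]

lemma collapse_cons_ne (c : Char) (l : List Char) (hc : c ≠ '.') :
    pvCollapse (c :: l) = c :: pvCollapse l := by
  rw [pvCollapse]; simp [hc]

lemma collapse_nil : pvCollapse [] = [] := by rw [pvCollapse]

lemma collapse_cons_dot (l : List Char) :
    pvCollapse ('.' :: l) = '.' :: pvCollapse (l.dropWhile (fun a => a == '.')) := by
  rw [pvCollapse]; simp

lemma collapse_append_word (w r : List Char) (hw : ∀ a ∈ w, a ≠ '.') :
    pvCollapse (w ++ r) = w ++ pvCollapse r := by
  induction w with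
  | nil => simp
  | cons a w ih =>
    have ha : a ≠ '.' := hw a (by simp)
    rw [List.cons_append, collapse_cons_ne a _ ha, ih (fun x hx => hw x (by simp [hx]))]
    simp

lemma consHead_consHead (a b : List Char) (X : List (List Char)) :
    pvConsHead a (pvConsHead b X) = pvConsHead (a ++ b) X := by
  cases X <;> simp [pvConsHead]

lemma canon_cons_ne (c : Char) (l : List Char) (hc : c ≠ '.') :
    pvCanon (c :: l) = pvConsHead [c] (pvCanon l) := by
  simp only [pvCanon, if_neg hc]
  cases h : pvCanon l <;> simp [pvConsHead]

lemma canon_append_word (w r : List Char) (hw : ∀ a ∈ w, a ≠ '.') :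
    pvCanon (w ++ r) = pvConsHead w (pvCanon r) := by
  induction w with
  | nil =>
    cases h : pvCanon r with
    | nil => exact absurd h (canon_ne_nil r)
    | cons s ss => simp [pvConsHead, h]
  | cons a w ih =>
    have ha : a ≠ '.' := hw a (by simp)
    rw [List.cons_append, canon_cons_ne a _ ha, ih (fun x hx => hw x (by simp [hx])),
      consHead_consHead]
    rfl

lemma words_cons_dot (t : List Char) : pvWords ('.' :: t) = pvWords t := by
  simp [pvWords, pvCanon]

lemma words_dropWhile (t : List Char) :
    pvWords (t.dropWhile (fun a => a == '.')) = pvWords t := by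
  induction t with
  | nil => rfl
  | cons a t ih =>
    by_cases ha : a = '.'
    · subst ha
      rw [List.dropWhile_cons]
      simp only [beq_self_eq_true, if_pos, decide_true]
      rw [words_cons_dot t, ih]
    · rw [List.dropWhile_cons]
      simp [ha]

lemma strip_cons_dot (x : List Char) :
    PySem.Chars.stripChars ('.' :: x) ['.'] = PySem.Chars.stripChars x ['.'] := by
  simp [PySem.Chars.stripChars, List.dropWhile_cons, contains_dot]

lemma rstrip_cons_dot (y : List Char) :
    pvRstripDot ('.' :: y) = if pvRstripDot y = [] then [] else '.' :: pvRstripDot y := by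
  simp only [pvRstripDot, List.reverse_cons, List.dropWhile_append]
  by_cases h : (y.reverse.dropWhile (fun c => c == '.')) = []
  · simp [h]
  · simp [h, List.isEmpty_iff]

lemma dropWhile_eq_self_of_forall {p : Char → Bool} (l : List Char)
    (h : ∀ a ∈ l, p a = false) : l.dropWhile p = l := by
  induction l with
  | nil => rfl
  | cons a l ih =>
    rw [List.dropWhile_cons, if_neg (by simp [h a (by simp)])]
    

lemma strip_word_append (w x : List Char) (hw : ∀ a ∈ w, a ≠ '.') (hne : w ≠ []) :
    PySem.Chars.stripChars (w ++ x) ['.'] = w ++ pvRstripDot x := by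
  obtain ⟨c, w', rfl⟩ := List.exists_cons_of_ne_nil hne
  have hc : (c == '.') = false := by simpa using hw c (by simp)
  simp only [PySem.Chars.stripChars, contains_dot]
  rw [List.cons_append, List.dropWhile_cons]
  simp only [hc, if_neg, Bool.false_eq_true, not_false_iff, ite_false]
  -- now the left strip is a no-op; handle the right side
  rw [show (c :: (w' ++ x) : List Char).reverse = x.reverse ++ (c :: w').reverse by
    simp, List.dropWhile_append]
  by_cases h : (x.reverse.dropWhile (fun c => c == '.')).isEmpty
  · have hself : List.dropWhile (fun c => c == '.') ((c :: w').reverse) = (c :: w').reverse := by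
      apply dropWhile_eq_self_of_forall
      intro a ha
      simpa using hw a (List.mem_reverse.mp ha)
    simp only [h, if_pos, hself]
    have hx0 : pvRstripDot x = [] := by
      simp only [pvRstripDot]
      simpa [List.isEmpty_iff] using h
    simp [hx0]
  · simp only [h, if_neg, Bool.false_eq_true, not_false_iff, ite_false]
    simp [pvRstripDot]

lemma join_cons (p : List Char) (ps : List (List Char)) :
    PySem.Chars.join ['.'] (p :: ps) =
      p ++ (if ps = [] then [] else '.' :: PySem.Chars.join ['.'] ps) := by
  cases ps with
  | nil => simp [PySem.Chars.join, List.intercalate]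
  | cons q qs => exact String.ofList_inj.mp rfl

lemma words_elem_ne_nil (t : List Char) (p : List Char) (hp : p ∈ pvWords t) : p ≠ [] := by
  have := List.of_mem_filter hp
  simpa [List.isEmpty_iff] using this

lemma join_words_eq_nil_iff (t : List Char) :
    PySem.Chars.join ['.'] (pvWords t) = [] ↔ pvWords t = [] := by
  constructor
  · intro h
    cases hw : pvWords t with
    | nil => rfl
    | cons p ps =>
      rw [hw, join_cons] at h
      have hp : p ≠ [] := words_elem_ne_nil t p (by rw [hw]; simp)
      rcases List.append_eq_nil_iff.1 h with ⟨h1, _⟩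
      exact absurd h1 hp
  · intro h; rw [h]; rfl

-- head of dropWhile fails the predicate
lemma dropWhile_head_false {p : Char → Bool} (l : List Char) (d : Char) (t : List Char)
    (h : l.dropWhile p = d :: t) : p d = false := by
  induction l with
  | nil => simp at h
  | cons a l ih =>
    rw [List.dropWhile_cons] at h
    by_cases ha : p a
    · exact ih (by simpa [ha] using h)
    · simp only [ha, Bool.false_eq_true, if_neg, not_false_iff, ite_false] at h
      cases h
      simpa using ha

-- strip = rstrip when the head of a collapsed dot-led-stripped list is not a dot
lemma strip_collapse_of_not_dot_head (z : List Char)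
    (hz : ∀ d t, z = d :: t → d ≠ '.') :
    PySem.Chars.stripChars (pvCollapse z) ['.'] = pvRstripDot (pvCollapse z) := by
  cases z with
  | nil => rw [collapse_nil]; rfl
  | cons d t =>
    have hd : d ≠ '.' := hz d t rfl
    rw [collapse_cons_ne d t hd]
    have : PySem.Chars.stripChars (d :: pvCollapse t) ['.']
        = ([d] : List Char) ++ pvRstripDot (pvCollapse t) :=
      strip_word_append [d] (pvCollapse t) (by simpa using hd) (by simp)
    rw [this, pvRstripDot, pvRstripDot]
    have hdb : (d == '.') = false := by simpa using hd
    rw [show ((d :: pvCollapse t : List Char)).reverse = (pvCollapse t).reverse ++ [d] by simp,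
      List.dropWhile_append]
    by_cases h : ((pvCollapse t).reverse.dropWhile (fun c => c == '.')).isEmpty
    · simp [h, List.dropWhile_cons, hdb, List.isEmpty_iff.1 h]
    · simp [h]


lemma main_strip (n : Nat) : ∀ cs : List Char, cs.length ≤ n →
    PySem.Chars.stripChars (pvCollapse cs) ['.'] = PySem.Chars.join ['.'] (pvWords cs) := by
  induction n with
  | zero =>
    intro cs h
    have : cs = [] := List.eq_nil_of_length_eq_zero (Nat.le_zero.1 h)
    subst this
    rw [collapse_nil]; rfl
  | succ n ih =>
    intro cs hlen
    cases cs with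
    | nil => rw [collapse_nil]; rfl
    | cons c rest =>
      by_cases hc : c = '.'
      · subst hc
        rw [collapse_cons_dot, strip_cons_dot,
          ih _ (Nat.le_trans (rest.length_dropWhile_le _) (Nat.le_of_succ_le_succ hlen)),
          words_dropWhile, words_cons_dot]
      · -- split rest into its leading dot-free word and the remainder
        set u := rest.takeWhile (fun a => !(a == '.')) with hu
        set r := rest.dropWhile (fun a => !(a == '.')) with hr
        have hrest : u ++ r = rest := List.takeWhile_append_dropWhile
        have hw : ∀ a ∈ (c :: u), a ≠ '.' := by
          intro a ha
          rcases List.mem_cons.1 ha with rfl | ha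
          · exact hc
          · have := List.mem_takeWhile_imp ha
            simpa using this
        have hcs : (c :: rest) = (c :: u) ++ r := by
          simp [← hrest]
        rw [hcs, collapse_append_word _ _ hw, strip_word_append _ _ hw (by simp)]
        cases hr2 : r with
        | nil =>
          rw [collapse_nil, show pvRstripDot [] = [] from rfl]
          have hwords : pvWords ((c :: u) ++ ([] : List Char)) = [c :: u] := by
            simp only [pvWords, canon_append_word _ _ hw]
            simp [pvCanon, pvConsHead]
          rw [hwords, join_cons]
          simp
        | cons d t =>
          have hd : d = '.' := by
            have := dropWhile_head_false rest d t (by rw [← hr, hr2])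
            simpa using this
          subst hd
          rw [collapse_cons_dot, rstrip_cons_dot]
          have hzlen : (t.dropWhile (fun a => a == '.')).length ≤ n := by
            have h1 : (t.dropWhile (fun a => a == '.')).length ≤ t.length :=
              t.length_dropWhile_le _
            have h2 : t.length < rest.length := by
              have h4 : r.length ≤ rest.length := by rw [hr]; exact rest.length_dropWhile_le _
              rw [hr2] at h4; simp at h4; omega
            have h3 : rest.length ≤ n := Nat.le_of_succ_le_succ hlen
            omega
          have hz : ∀ d' t', t.dropWhile (fun a => a == '.') = d' :: t' → d' ≠ '.' := by
            intro d' t' h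
            have := dropWhile_head_false t d' t' h
            simpa using this
          have hrec : pvRstripDot (pvCollapse (t.dropWhile (fun a => a == '.')))
              = PySem.Chars.join ['.'] (pvWords t) := by
            rw [← strip_collapse_of_not_dot_head _ hz, ih _ hzlen, words_dropWhile]
          rw [hrec]
          have hwords : pvWords ((c :: u) ++ ('.' :: t)) = (c :: u) :: pvWords t := by
            simp only [pvWords, canon_append_word _ _ hw,
              show pvCanon ('.' :: t) = [] :: pvCanon t from by simp [pvCanon], pvConsHead]
            simp
          rw [hwords, join_cons]
          by_cases hnil : pvWords t = []
          · rw [(join_words_eq_nil_iff t).2 hnil]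
            simp [hnil]
          · have hj : PySem.Chars.join ['.'] (pvWords t) ≠ [] :=
              fun h => hnil ((join_words_eq_nil_iff t).1 h)
            simp [hnil, hj]

-- the main bridge: strip('.') of the collapsed string = '.'-join of the nonempty segments
lemma strip_collapse_eq_join_words (cs : List Char) :
    PySem.Chars.stripChars (pvCollapse cs) ['.'] = PySem.Chars.join ['.'] (pvWords cs) :=
  main_strip cs.length cs (Nat.le_refl _)

-- A's while loop is B's ljust (both leave '' alone on the unreachable branch)
lemma step7_eq_pad (t : List Char) :
    pvStep7 3 t =
      (match t.getLast? with
       | some c => t ++ List.replicate (3 - t.length) c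
       | none => t) := by
  rcases t with _ | ⟨a, _ | ⟨b, _ | ⟨d, rest⟩⟩⟩
  · rfl
  · simp [pvStep7, List.getLast?]
  · simp [pvStep7, List.getLast?]
  · have h3 : ¬ (a :: b :: d :: rest).length < 3 := by simp
    simp only [pvStep7]
    rw [if_neg h3]
    cases hgl : (a :: b :: d :: rest).getLast? <;> simp

lemma pad_match_ofList (t : List Char) :
    String.ofList
      (match t.getLast? with
       | some c => t ++ List.replicate (3 - t.length) c
       | none => t) =
      (match t.getLast? with
       | some c => String.ofList (t ++ List.replicate (3 - t.length) c)
       | none => String.ofList t) := by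
  cases t.getLast? <;> rfl

-- ===== VERDICT (by name: the statement is the Claim_ definition above) =====
theorem solution_spec : Claim_equal_solution := by
  intro new_id _
  simp only [Spec_solution, solution, solution_alt]
  rw [step2_eq_filter, step3_eq_collapse, splitOn_eq_canon, strip_collapse_eq_join_words,
    PySem.List.slice_to _ (by norm_num : (0 : Int) ≤ 15), step7_eq_pad, pad_match_ofList]
  rfl
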